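-- pv_equiv track=rewrite | github.com/LHT02/KIGTTS | pc_trainer/tools/piper_prep.py | _strip_language_flags
-- ===== SOURCE A (Python) =====
-- from typing import Dict, Iterable, List, Tuple
--
-- def _strip_language_flags(phoneme_text: str) -> str:
--     out: List[str] = []
--     in_flag = False
--     for ch in phoneme_text:
--         if in_flag:
--             if ch == ")":
--                 in_flag = False
--             continue
--         if ch == "(":
--             in_flag = True
--             continue
--         if ch in "\r\n":
--             continue
--         out.append(ch)
--     return "".join(out)
-- ===== SOURCE B (Python) =====
-- def _strip_language_flags(phoneme_text: str) -> str:
--     head, sep, rest = phoneme_text.partition("(")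
--     cleaned = "".join(ch for ch in head if ch not in "\r\n")
--     if not sep:
--         return cleaned
--     _, _, tail = rest.partition(")")
--     return cleaned + _strip_language_flags(tail)
-- ===== Notes on version B (the rewrite author's own statement) =====
-- stated objective: simpler
-- what changed: Replaced the character-by-character loop with an explicit in_flag boolean state by a recursion on str.partition that cuts out one parenthesized segment per step and filters CR/LF from the kept head.
import Mathlib
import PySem

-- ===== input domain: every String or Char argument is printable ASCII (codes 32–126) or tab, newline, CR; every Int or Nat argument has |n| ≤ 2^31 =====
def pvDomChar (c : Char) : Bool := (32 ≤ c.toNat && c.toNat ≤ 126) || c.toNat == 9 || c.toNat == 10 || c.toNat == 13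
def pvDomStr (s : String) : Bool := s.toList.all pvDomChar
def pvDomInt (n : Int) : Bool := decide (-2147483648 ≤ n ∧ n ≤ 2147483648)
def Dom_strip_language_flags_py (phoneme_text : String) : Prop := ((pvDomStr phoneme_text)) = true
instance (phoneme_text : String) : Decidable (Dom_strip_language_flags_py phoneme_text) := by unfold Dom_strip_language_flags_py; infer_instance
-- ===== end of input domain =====

-- B replaces A's character-by-character flag state machine by a recursion on str.partition,
-- cutting out one parenthesized segment per step (objective: simpler, no flag state).

-- ===== PORT A =====
-- literal transliteration of A's loop: state = (out list, in_flag); "".join(out) at the end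
-- the loop body of A (st = (out, in_flag)), named for readability
def stepA (st : List Char × Bool) (ch : Char) : List Char × Bool :=
  if st.2 then
    (st.1, if ch == ')' then false else st.2)
  else if ch == '(' then (st.1, true)
  else if ch == '\r' || ch == '\n' then st
  else (st.1 ++ [ch], st.2)

def strip_language_flags_py (phoneme_text : String) : String :=
  String.mk ((phoneme_text.toList.foldl stepA ([], false)).1)

-- ===== PORT B =====
-- str.partition(sep) for the one-char sep "(" is ported by hand, exactly:
-- head = takeWhile (≠ '('), and the part after the separator is (dropWhile (≠ '(')).drop 1;
-- the match on dropWhile distinguishes "separator found" from "not found" (Source B's `if not sep`).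
def altStrip (cs : List Char) : List Char :=
  let cleaned := (cs.takeWhile (fun c => !(c == '('))).filter (fun c => !(c == '\r' || c == '\n'))
  match h : cs.dropWhile (fun c => !(c == '(')) with
  | [] => cleaned
  | _ :: rest => cleaned ++ altStrip ((rest.dropWhile (fun c => !(c == ')'))).drop 1)
termination_by cs.length
decreasing_by
  have h1 : (cs.dropWhile (fun c => !(c == '('))).length ≤ cs.length :=
    List.length_dropWhile_le _ _
  rw [h] at h1
  have h2 := List.length_dropWhile_le (fun c => !(c == ')')) rest
  simp at h1 ⊢
  omega

def strip_language_flags_py_alt (phoneme_text : String) : String :=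
  String.mk (altStrip phoneme_text.toList)

-- ===== PRECONDITION & SPEC =====
def Spec_strip_language_flags_py (phoneme_text : String) (out : String) : Prop := out = strip_language_flags_py_alt phoneme_text
instance (phoneme_text : String) (out : String) : Decidable (Spec_strip_language_flags_py phoneme_text out) := by unfold Spec_strip_language_flags_py; infer_instance

-- ===== CLAIM (what is proved, stated in full; the proofs are below) =====
def Claim_equal_strip_language_flags_py : Prop := ∀ (phoneme_text : String), Dom_strip_language_flags_py phoneme_text → Spec_strip_language_flags_py phoneme_text (strip_language_flags_py phoneme_text)

-- ===== LEMMAS AND PROOFS =====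

-- direct recursive form of A's loop (proof helper)
def goA : Bool → List Char → List Char
  | _, [] => []
  | true, c :: cs => goA (if c == ')' then false else true) cs
  | false, c :: cs =>
    if c == '(' then goA true cs
    else if c == '\r' || c == '\n' then goA false cs
    else c :: goA false cs

theorem foldA_spec (cs : List Char) : ∀ (out : List Char) (flag : Bool),
    (cs.foldl stepA (out, flag)).1 = out ++ goA flag cs := by
  induction cs with
  | nil => intro out flag; simp [goA]
  | cons c cs ih =>
    intro out flag
    rw [List.foldl_cons]
    cases flag with
    | true =>
      by_cases h : c = ')'
      · rw [show stepA (out, true) c = (out, false) from by simp [stepA, h],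
            ih, show goA true (c :: cs) = goA false cs from by simp [goA, h]]
      · rw [show stepA (out, true) c = (out, true) from by simp [stepA, h],
            ih, show goA true (c :: cs) = goA true cs from by simp [goA, h]]
    | false =>
      by_cases h1 : c = '('
      · rw [show stepA (out, false) c = (out, true) from by simp [stepA, h1],
            ih, show goA false (c :: cs) = goA true cs from by simp [goA, h1]]
      · by_cases h2 : c = '\r' ∨ c = '\n'
        · rw [show stepA (out, false) c = (out, false) from by
                rcases h2 with h2 | h2 <;> simp [stepA, h1, h2],
              ih, show goA false (c :: cs) = goA false cs from by
                rcases h2 with h2 | h2 <;> simp [goA, h1, h2]]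
        · rw [show stepA (out, false) c = (out ++ [c], false) from by
                simp [stepA, h1]; tauto,
              ih, show goA false (c :: cs) = c :: goA false cs from by
                simp [goA, h1]; tauto]
          simp

-- unfold lemmas for altStrip (its recursion uses a dependent match on dropWhile)
theorem altStrip_of_dropWhile_nil (cs : List Char)
    (hd : cs.dropWhile (fun c => !(c == '(')) = []) :
    altStrip cs =
      (cs.takeWhile (fun c => !(c == '('))).filter (fun c => !(c == '\r' || c == '\n')) := by
  rw [altStrip]
  split
  · rfl
  · rename_i x rest h'; rw [hd] at h'; cases h'

theorem altStrip_of_dropWhile_cons (cs : List Char) (x : Char) (rest : List Char)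
    (hd : cs.dropWhile (fun c => !(c == '(')) = x :: rest) :
    altStrip cs =
      (cs.takeWhile (fun c => !(c == '('))).filter (fun c => !(c == '\r' || c == '\n'))
        ++ altStrip ((rest.dropWhile (fun c => !(c == ')'))).drop 1) := by
  rw [altStrip]
  split
  · rename_i h'; rw [hd] at h'; cases h'
  · rename_i x' rest' h'
    rw [hd] at h'
    injection h' with hx hrest
    rw [hrest]

theorem goA_true (cs : List Char) :
    goA true cs = goA false ((cs.dropWhile (fun c => !(c == ')'))).drop 1) := by
  induction cs with
  | nil => simp [goA]
  | cons c cs ih =>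
    by_cases h : c = ')' <;> simp [goA, h, ih]

theorem altStrip_cons (c : Char) (cs : List Char) (h : ¬ c = '(') :
    altStrip (c :: cs) =
      (if c = '\r' ∨ c = '\n' then [] else [c]) ++ altStrip cs := by
  cases hd : cs.dropWhile (fun c => !(c == '(')) with
  | nil =>
    have hd' : (c :: cs).dropWhile (fun c => !(c == '(')) = [] := by
      simp [List.dropWhile_cons, h, hd]
    rw [altStrip_of_dropWhile_nil _ hd', altStrip_of_dropWhile_nil _ hd]
    simp [List.takeWhile_cons, h, List.filter_cons]
    split_ifs <;> simp_all
  | cons x rest =>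
    have hd' : (c :: cs).dropWhile (fun c => !(c == '(')) = x :: rest := by
      simp [List.dropWhile_cons, h, hd]
    rw [altStrip_of_dropWhile_cons _ _ _ hd', altStrip_of_dropWhile_cons _ _ _ hd]
    simp [List.takeWhile_cons, h, List.filter_cons]
    split_ifs <;> simp_all

theorem goA_eq_altStrip : ∀ (n : ℕ) (cs : List Char), cs.length ≤ n →
    goA false cs = altStrip cs := by
  intro n
  induction n with
  | zero =>
    intro cs h
    have : cs = [] := List.eq_nil_of_length_eq_zero (Nat.le_zero.mp h)
    subst this
    rw [altStrip_of_dropWhile_nil _ (by simp)]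
    simp [goA]
  | succ n ih =>
    intro cs h
    cases cs with
    | nil =>
      rw [altStrip_of_dropWhile_nil _ (by simp)]
      simp [goA]
    | cons c cs =>
      by_cases hc : c = '('
      · subst hc
        have hd' : ('(' :: cs).dropWhile (fun c => !(c == '(')) = '(' :: cs := by
          simp [List.dropWhile_cons]
        rw [altStrip_of_dropWhile_cons _ _ _ hd']
        have hlen : ((cs.dropWhile (fun c => !(c == ')'))).drop 1).length ≤ n := by
          have := List.length_dropWhile_le (fun c => !(c == ')')) cs
          simp only [List.length_drop]
          simp at h; omega
        simp only [goA, goA_true, ih _ hlen]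
        simp [List.takeWhile_cons]
      · rw [altStrip_cons c cs hc]
        have hlen : cs.length ≤ n := by simp at h; omega
        rw [← ih _ hlen]
        by_cases h2 : c = '\r' ∨ c = '\n'
        · rcases h2 with h2 | h2 <;> simp_all [goA]
        · push_neg at h2
          simp [goA, hc, h2.1, h2.2]

-- ===== VERDICT (by name: the statement is the Claim_ definition above) =====
theorem strip_language_flags_py_spec : Claim_equal_strip_language_flags_py := by
  intro s _
  unfold Spec_strip_language_flags_py strip_language_flags_py strip_language_flags_py_alt
  rw [foldA_spec]
  simp [goA_eq_altStrip s.toList.length s.toList le_rfl]
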